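-- pv_equiv track=rewrite | github.com/k-harada/AtCoder | ABC146/C.py | solve
-- ===== SOURCE A (Python) =====
-- def solve(a, b, x):
--     res = 0
--     for k in range(1, 10):
--         r = (x - k * b) // a
--         r = min(10 ** k - 1, r)
--         if r >= 10 ** (k - 1):
--             res = r
--     if x >= (10 ** 9) * a + b * 10:
--         res = 10 ** 9
--     return res
-- ===== SOURCE B (Python) =====
-- def solve(a, b, x):
--     if x >= 10 ** 9 * a + 10 * b:
--         return 10 ** 9
--     def best(k):
--         if k == 0:
--             return 0
--         r = min(10 ** k - 1, (x - k * b) // a)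
--         return r if r >= 10 ** (k - 1) else best(k - 1)
--     return best(9)
-- ===== Notes on version B (the rewrite author's own statement) =====
-- stated objective: simpler
-- what changed: B replaces A's ascending loop with a mutable accumulator and a trailing 10**9 override by an early-return: it tests the 10**9 case first, then recurses over digit lengths from 9 down to 1 and returns the first feasible candidate, so no accumulator is kept.
import Mathlib
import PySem

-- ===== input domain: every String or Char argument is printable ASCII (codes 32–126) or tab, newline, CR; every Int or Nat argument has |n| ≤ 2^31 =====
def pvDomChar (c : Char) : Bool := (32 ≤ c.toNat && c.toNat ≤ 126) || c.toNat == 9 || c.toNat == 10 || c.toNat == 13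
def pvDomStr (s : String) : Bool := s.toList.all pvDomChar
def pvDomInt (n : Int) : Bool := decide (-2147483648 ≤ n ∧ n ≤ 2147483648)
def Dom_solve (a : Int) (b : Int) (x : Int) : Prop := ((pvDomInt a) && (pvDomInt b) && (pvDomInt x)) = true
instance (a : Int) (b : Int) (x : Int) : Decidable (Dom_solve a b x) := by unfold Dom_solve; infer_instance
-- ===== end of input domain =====

-- B keeps A's per-digit-length candidate formula but inverts the control flow: early-return
-- (10**9 case first, then digit lengths scanned 9→1, first hit returned) instead of A's
-- ascending loop with an accumulator and a trailing override. Objective: simpler.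

-- ===== PORT A =====
def solve (a : Int) (b : Int) (x : Int) : Int :=
  let res : Int :=
    (PySem.List.pyRange 1 10 1).foldl (fun res k =>
      let r := PySem.Int.floordiv (x - k * b) a
      let r := min ((10 : Int) ^ k.toNat - 1) r
      if r ≥ (10 : Int) ^ (k - 1).toNat then r else res) 0
  if x ≥ (10 : Int) ^ (9 : Nat) * a + b * 10 then (10 : Int) ^ (9 : Nat) else res

-- ===== PORT B =====
-- best k: first feasible candidate scanning digit lengths k, k-1, …, 1; 0 if none.
def solveBest (a : Int) (b : Int) (x : Int) : Nat → Int
  | 0 => 0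
  | n + 1 =>
    let k : Int := (n : Int) + 1
    let r := min ((10 : Int) ^ (n + 1) - 1) (PySem.Int.floordiv (x - k * b) a)
    if r ≥ (10 : Int) ^ n then r else solveBest a b x n

def solve_alt (a : Int) (b : Int) (x : Int) : Int :=
  if x ≥ (10 : Int) ^ (9 : Nat) * a + 10 * b then (10 : Int) ^ (9 : Nat)
  else solveBest a b x 9

-- ===== PRECONDITION & SPEC =====
-- Pre_ excludes a = 0, on which A raises ZeroDivisionError.
def Pre_solve (a : Int) (b : Int) (x : Int) : Prop := a ≠ 0
instance (a : Int) (b : Int) (x : Int) : Decidable (Pre_solve a b x) := by unfold Pre_solve; infer_instance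
def pvWitness_solve : Int × Int × Int := (1, 1, 100)

def Spec_solve (a : Int) (b : Int) (x : Int) (out : Int) : Prop := out = solve_alt a b x
instance (a : Int) (b : Int) (x : Int) (out : Int) : Decidable (Spec_solve a b x out) := by unfold Spec_solve; infer_instance

-- ===== CLAIM (what is proved, stated in full; the proofs are below) =====
def Claim_equal_solve : Prop := ∀ (a : Int) (b : Int) (x : Int), Dom_solve a b x → Pre_solve a b x → Spec_solve a b x (solve a b x)

-- ===== LEMMAS AND PROOFS =====

-- A's loop body as a named step function, and the ascending list [1,…,n] built back-to-front.
def solveStep (a : Int) (b : Int) (x : Int) (res : Int) (k : Int) : Int :=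
  let r := PySem.Int.floordiv (x - k * b) a
  let r := min ((10 : Int) ^ k.toNat - 1) r
  if r ≥ (10 : Int) ^ (k - 1).toNat then r else res

def ascInts : Nat → List Int
  | 0 => []
  | n + 1 => ascInts n ++ [(n : Int) + 1]

theorem foldl_asc (a b x : Int) :
    ∀ n : Nat, (ascInts n).foldl (solveStep a b x) 0 = solveBest a b x n := by
  intro n
  induction n with
  | zero => rfl
  | succ m ih =>
    have h1 : (((m : Int) + 1)).toNat = m + 1 := by omega
    have h2 : (((m : Int) + 1) - 1).toNat = m := by omega
    simp only [ascInts, List.foldl_append, List.foldl, ih, solveBest, solveStep, h1, h2]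

-- ===== VERDICT (by name: the statement is the Claim_ definition above) =====
theorem solve_spec : Claim_equal_solve := by
  intro a b x _ _
  unfold Spec_solve solve solve_alt
  have hr : PySem.List.pyRange 1 10 1 = ascInts 9 := by decide
  have hstep : (fun (res k : Int) =>
      let r := PySem.Int.floordiv (x - k * b) a
      let r := min ((10 : Int) ^ k.toNat - 1) r
      if r ≥ (10 : Int) ^ (k - 1).toNat then r else res) = solveStep a b x := rfl
  rw [hr, hstep, foldl_asc, mul_comm b 10]
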